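-- pv_equiv track=rewrite | github.com/qferre/warshard | warshard/utils.py | ensure_lowest_key
-- ===== SOURCE A (Python) =====
-- def ensure_lowest_key(dictionary):
--     # Keep an element only in the list of smallest key
--     # Input : a dictionary like {1:[A],2:[A,B]}
--     # Output : a dictionary like input but where
--     # each element is present only in the list of lowest
--     # key that contained it originally. For the input
--     # example, the output would be {1:[A],2:[B]}
--     seen_objects = set()
--     for key in sorted(dictionary.keys()):
--         unique_objects = []
--         for obj in dictionary[key]:
--             if obj not in seen_objects:
--                 unique_objects.append(obj)
--                 seen_objects.add(obj)
--         dictionary[key] = unique_objects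
--     return dictionary
-- ===== SOURCE B (Python) =====
-- def ensure_lowest_key(dictionary):
--     # One pass to find each object's lowest key (no sorting needed),
--     # one pass to rebuild every list in place.
--     lowest = {}
--     for key, objs in dictionary.items():
--         for obj in objs:
--             if obj not in lowest or key < lowest[obj]:
--                 lowest[obj] = key
--     for key, objs in dictionary.items():
--         kept = []
--         taken = set()
--         for obj in objs:
--             if lowest[obj] == key and obj not in taken:
--                 kept.append(obj)
--                 taken.add(obj)
--         dictionary[key] = kept
--     return dictionary
-- ===== Notes on version B (the rewrite author's own statement) =====
-- stated objective: alternative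
-- what changed: Replaces the sort-keys-then-sweep-with-a-global-seen-set algorithm by two unordered passes: a first pass builds a lowest-key table for every object, a second pass rebuilds each list keeping an object only at its lowest key (local per-list dedup), so no sorting and no global seen set.
import Mathlib
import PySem

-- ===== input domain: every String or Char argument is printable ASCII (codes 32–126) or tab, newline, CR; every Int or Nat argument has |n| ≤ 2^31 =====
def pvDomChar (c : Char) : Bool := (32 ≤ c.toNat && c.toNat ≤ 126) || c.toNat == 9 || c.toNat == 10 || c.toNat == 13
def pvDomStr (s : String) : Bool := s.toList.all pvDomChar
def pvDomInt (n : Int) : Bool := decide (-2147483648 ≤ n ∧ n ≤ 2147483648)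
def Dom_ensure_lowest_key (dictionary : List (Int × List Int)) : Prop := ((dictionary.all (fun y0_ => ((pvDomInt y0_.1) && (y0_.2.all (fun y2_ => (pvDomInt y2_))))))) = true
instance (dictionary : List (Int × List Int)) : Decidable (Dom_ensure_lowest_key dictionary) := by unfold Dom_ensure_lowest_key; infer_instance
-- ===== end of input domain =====

-- B replaces A's sort-keys-then-sweep-with-a-global-seen-set by two unordered passes (a lowest-key
-- table, then a per-list rebuild) — no sorting, no global seen set (objective: alternative).
-- Both Pythons mutate the input dict in place identically; the equivalence proved is about the return value.

-- ===== PORT A =====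
def ensure_lowest_key (dictionary : List (Int × List Int)) : List (Int × List Int) :=
  -- the dict argument: insertion-ordered, duplicate keys collapsed (exactly Python's dict)
  let d0 : PySem.Dict Int (List Int) := PySem.Dict.ofList dictionary
  let fin := (PySem.List.sorted (PySem.Dict.keys d0) (fun k => k) false).foldl
    (fun (st : PySem.Dict Int (List Int) × PySem.Set Int) key =>
      let inner := (PySem.Dict.getD st.1 key []).foldl
        (fun (p : List Int × PySem.Set Int) obj =>
          if !(PySem.Set.contains p.2 obj) then (p.1 ++ [obj], PySem.Set.add p.2 obj) else p)
        ([], st.2)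
      (PySem.Dict.insert st.1 key inner.1, inner.2))
    (d0, PySem.Set.empty)
  (fin.1).items

-- ===== PORT B =====
def ensure_lowest_key_alt (dictionary : List (Int × List Int)) : List (Int × List Int) :=
  let d0 : PySem.Dict Int (List Int) := PySem.Dict.ofList dictionary
  -- first pass: lowest[obj] = smallest key whose list contains obj
  let lowest : PySem.Dict Int Int := (d0.items).foldl
    (fun low p => p.2.foldl
      (fun (low : PySem.Dict Int Int) obj =>
        match PySem.Dict.get? low obj with
        | none => PySem.Dict.insert low obj p.1
        | some m => if p.1 < m then PySem.Dict.insert low obj p.1 else low)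
      low)
    PySem.Dict.empty
  -- second pass: keep obj only at its lowest key, deduped within the list
  let fin := (d0.items).foldl
    (fun d p =>
      let kept := p.2.foldl
        (fun (q : List Int × PySem.Set Int) obj =>
          if (PySem.Dict.get? lowest obj == some p.1) && !(PySem.Set.contains q.2 obj)
          then (q.1 ++ [obj], PySem.Set.add q.2 obj) else q)
        ([], PySem.Set.empty)
      PySem.Dict.insert d p.1 kept.1)
    d0
  fin.items

-- ===== PRECONDITION & SPEC =====
def Spec_ensure_lowest_key (dictionary : List (Int × List Int)) (out : List (Int × List Int)) : Prop := out = ensure_lowest_key_alt dictionary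
instance (dictionary : List (Int × List Int)) (out : List (Int × List Int)) : Decidable (Spec_ensure_lowest_key dictionary out) := by unfold Spec_ensure_lowest_key; infer_instance

-- ===== CLAIM (what is proved, stated in full; the proofs are below) =====
def Claim_equal_ensure_lowest_key : Prop := ∀ (dictionary : List (Int × List Int)), Dom_ensure_lowest_key dictionary → Spec_ensure_lowest_key dictionary (ensure_lowest_key dictionary)

-- ===== LEMMAS AND PROOFS =====

def pvAval (objs : List Int) (acc : List Int × PySem.Set Int) : List Int × PySem.Set Int :=
  objs.foldl (fun p obj => if !(PySem.Set.contains p.2 obj) then (p.1 ++ [obj], PySem.Set.add p.2 obj) else p) acc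

def pvBval (lowest : PySem.Dict Int Int) (k : Int) (objs : List Int) (acc : List Int × PySem.Set Int) : List Int × PySem.Set Int :=
  objs.foldl (fun q obj => if (PySem.Dict.get? lowest obj == some k) && !(PySem.Set.contains q.2 obj) then (q.1 ++ [obj], PySem.Set.add q.2 obj) else q) acc

def pvOMin (a b : Option Int) : Option Int :=
  match a, b with
  | none, b => b
  | a, none => a
  | some x, some y => some (min x y)

def pvMinKeys (ps : List (Int × List Int)) (o : Int) : Option Int :=
  ((ps.filter (fun p => decide (o ∈ p.2))).map (·.1)).min?

def pvLow (d0 : PySem.Dict Int (List Int)) : PySem.Dict Int Int :=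
  d0.items.foldl
    (fun low p => p.2.foldl
      (fun (low : PySem.Dict Int Int) obj =>
        match PySem.Dict.get? low obj with
        | none => PySem.Dict.insert low obj p.1
        | some m => if p.1 < m then PySem.Dict.insert low obj p.1 else low)
      low)
    PySem.Dict.empty

lemma pvOMin_none_right (a : Option Int) : pvOMin a none = a := by cases a <;> rfl
lemma pvOMin_assoc (a b c : Option Int) : pvOMin (pvOMin a b) c = pvOMin a (pvOMin b c) := by
  cases a <;> cases b <;> cases c <;> simp [pvOMin, min_assoc]
lemma pvMinKeys_cons (p : Int × List Int) (ps : List (Int × List Int)) (o : Int) :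
    pvMinKeys (p :: ps) o = if o ∈ p.2 then pvOMin (some p.1) (pvMinKeys ps o) else pvMinKeys ps o := by
  by_cases h : o ∈ p.2
  · simp [pvMinKeys, h, List.min?_cons]
    cases ((ps.filter (fun p => decide (o ∈ p.2))).map (·.1)).min? <;> simp [pvOMin]
  · simp [pvMinKeys, h]

lemma low_inner (k : Int) (objs : List Int) :
    ∀ (low : PySem.Dict Int Int) (o : Int),
      (objs.foldl
        (fun (low : PySem.Dict Int Int) obj =>
          match PySem.Dict.get? low obj with
          | none => PySem.Dict.insert low obj k
          | some m => if k < m then PySem.Dict.insert low obj k else low)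
        low).get? o
      = if o ∈ objs then pvOMin (low.get? o) (some k) else low.get? o := by
  induction objs with
  | nil => simp
  | cons obj rest ih =>
    intro low o
    simp only [List.foldl_cons, ih]
    have hstep : (match PySem.Dict.get? low obj with
          | none => PySem.Dict.insert low obj k
          | some m => if k < m then PySem.Dict.insert low obj k else low).get? o
        = if o = obj then pvOMin (low.get? obj) (some k) else low.get? o := by
      by_cases ho : o = obj
      · subst ho
        cases hg : PySem.Dict.get? low o with
        | none => simp [PySem.Dict.get?_insert, hg, pvOMin]
        | some m =>
          by_cases hk : k < m
          · simp [hg, hk, PySem.Dict.get?_insert, pvOMin]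
            omega
          · simp [hg, hk, pvOMin]
            omega
      · cases hg : PySem.Dict.get? low obj with
        | none => simp [PySem.Dict.get?_insert, ho]
        | some m =>
          by_cases hk : k < m <;> simp [hk, PySem.Dict.get?_insert, ho]
    by_cases ho : o = obj
    · subst ho
      simp [hstep]
      by_cases hr : o ∈ rest
      · simp [hr]
        cases low.get? o with
        | none => simp [pvOMin]
        | some m => simp [pvOMin]
      · simp [hr]
    · simp [hstep, ho]

lemma low_outer (ps : List (Int × List Int)) :
    ∀ (low : PySem.Dict Int Int) (o : Int),
      (ps.foldl
        (fun low p => p.2.foldl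
          (fun (low : PySem.Dict Int Int) obj =>
            match PySem.Dict.get? low obj with
            | none => PySem.Dict.insert low obj p.1
            | some m => if p.1 < m then PySem.Dict.insert low obj p.1 else low)
          low)
        low).get? o
      = pvOMin (low.get? o) (pvMinKeys ps o) := by
  induction ps with
  | nil => simp [pvMinKeys, pvOMin_none_right]
  | cons p rest ih =>
    intro low o
    simp only [List.foldl_cons, ih, low_inner, pvMinKeys_cons]
    by_cases h : o ∈ p.2
    · simp only [h, if_pos, ← pvOMin_assoc]
    · simp [h]

lemma aval_snd_mem (objs : List Int) :
    ∀ (acc : List Int) (seen : PySem.Set Int) (o : Int),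
      o ∈ (pvAval objs (acc, seen)).2 ↔ o ∈ seen ∨ o ∈ objs := by
  induction objs with
  | nil => simp [pvAval]
  | cons obj rest ih =>
    intro acc seen o
    simp only [pvAval, List.foldl_cons]
    by_cases hc : PySem.Set.contains seen obj
    · have hmem : obj ∈ seen := (PySem.Set.contains_iff _ _).1 hc
      simp only [hc, Bool.not_true, if_neg, Bool.false_eq_true, not_false_iff]
      rw [show (rest.foldl (fun p obj => if !(PySem.Set.contains p.2 obj) then (p.1 ++ [obj], PySem.Set.add p.2 obj) else p) (acc, seen)) = pvAval rest (acc, seen) from rfl]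
      rw [ih]
      constructor
      · rintro (h | h) <;> simp_all [List.mem_cons]
      · rintro (h | h) <;> simp_all [List.mem_cons]
        rcases h with h | h
        · subst h; exact Or.inl hmem
        · exact Or.inr h
    · simp only [hc, Bool.not_false, ite_true]
      rw [show (rest.foldl (fun p obj => if !(PySem.Set.contains p.2 obj) then (p.1 ++ [obj], PySem.Set.add p.2 obj) else p) (acc ++ [obj], PySem.Set.add seen obj)) = pvAval rest (acc ++ [obj], PySem.Set.add seen obj) from rfl]
      rw [ih]
      simp [PySem.Set.mem_add, List.mem_cons]
      tauto

lemma inner_eq (lowest : PySem.Dict Int Int) (k : Int) (objs : List Int) :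
    ∀ (acc : List Int) (seen taken : PySem.Set Int) (Sp : Int → Prop),
      (∀ o, o ∈ seen ↔ (Sp o ∨ o ∈ taken)) →
      (∀ o ∈ objs, (PySem.Dict.get? lowest o = some k) ↔ ¬ Sp o) →
      (pvAval objs (acc, seen)).1 = (pvBval lowest k objs (acc, taken)).1 := by
  induction objs with
  | nil => intros; rfl
  | cons obj rest ih =>
    intro acc seen taken Sp hrel hmin
    have hmin0 := hmin obj (by simp)
    simp only [pvAval, pvBval, List.foldl_cons]
    by_cases hS : Sp obj
    · -- A skips; B skips (lowest ≠ some k)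
      have hA : PySem.Set.contains seen obj = true := by
        rw [PySem.Set.contains_iff]; exact (hrel obj).2 (Or.inl hS)
      have hB : (PySem.Dict.get? lowest obj == some k) = false := by
        rw [beq_eq_false_iff_ne]; intro h; exact (hmin0.1 h) hS
      simp only [hA, hB, Bool.not_true, Bool.false_and, if_neg, Bool.false_eq_true, not_false_iff]
      exact ih acc seen taken Sp hrel (fun o ho => hmin o (by simp [ho]))
    · have hB1 : (PySem.Dict.get? lowest obj == some k) = true := by
        rw [beq_iff_eq]; exact hmin0.2 hS
      by_cases ht : obj ∈ taken
      · -- both skip (obj in taken hence in seen)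
        have hA : PySem.Set.contains seen obj = true := by
          rw [PySem.Set.contains_iff]; exact (hrel obj).2 (Or.inr ht)
        have hT : PySem.Set.contains taken obj = true := by
          rw [PySem.Set.contains_iff]; exact ht
        simp only [hA, hB1, hT, Bool.not_true, Bool.and_false, if_neg, Bool.false_eq_true, not_false_iff]
        exact ih acc seen taken Sp hrel (fun o ho => hmin o (by simp [ho]))
      · -- both keep
        have hA : PySem.Set.contains seen obj = false := by
          rw [Bool.eq_false_iff, Ne, PySem.Set.contains_iff]
          intro h; rcases (hrel obj).1 h with h' | h' <;> [exact hS h'; exact ht h']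
        have hT : PySem.Set.contains taken obj = false := by
          rw [Bool.eq_false_iff, Ne, PySem.Set.contains_iff]; exact ht
        simp only [hA, hB1, hT, Bool.not_false, Bool.and_true, ite_true]
        refine ih (acc ++ [obj]) _ _ Sp ?_ (fun o ho => hmin o (by simp [ho]))
        intro o
        rw [PySem.Set.mem_add, PySem.Set.mem_add, hrel o]
        tauto

lemma items_val_eq (d0 : PySem.Dict Int (List Int)) (hnd : d0.keys.Nodup) {k : Int} {v v' : List Int}
    (h1 : (k, v) ∈ d0.items) (h2 : (k, v') ∈ d0.items) : v = v' := by
  have e1 := PySem.Dict.get?_of_mem_items d0 h1 hnd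
  have e2 := PySem.Dict.get?_of_mem_items d0 h2 hnd
  rw [e1] at e2; exact Option.some_inj.1 e2

lemma keys_of_items_map (d d0 : PySem.Dict Int (List Int)) (f : Int × List Int → List Int)
    (hd : d.items = d0.items.map (fun q => (q.1, f q))) : d.keys = d0.keys := by
  show d.items.map (·.1) = d0.items.map (·.1)
  rw [hd, List.map_map]; rfl

lemma b_outer (d0 : PySem.Dict Int (List Int)) (lowest : PySem.Dict Int Int) (hnd : d0.keys.Nodup) :
    ∀ (ps : List (Int × List Int)) (d : PySem.Dict Int (List Int)),
      (∀ q ∈ ps, q ∈ d0.items) →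
      (ps.map (·.1)).Nodup →
      (d.items = d0.items.map (fun q => (q.1, if q.1 ∈ ps.map (·.1) then q.2 else (pvBval lowest q.1 q.2 ([], PySem.Set.empty)).1))) →
      (ps.foldl (fun d p => PySem.Dict.insert d p.1 (pvBval lowest p.1 p.2 ([], PySem.Set.empty)).1) d).items
      = d0.items.map (fun q => (q.1, (pvBval lowest q.1 q.2 ([], PySem.Set.empty)).1)) := by
  intro ps
  induction ps with
  | nil =>
    intro d _ _ hd
    simpa using hd
  | cons p rest ih =>
    intro d hsub hpnd hd
    have hp0 : p ∈ d0.items := hsub p (by simp)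
    have hkeys : d.keys = d0.keys := keys_of_items_map d d0 _ hd
    have hcont : d.contains p.1 = true := by
      rw [PySem.Dict.contains_eq_decide_mem_keys, hkeys, decide_eq_true_iff]
      exact List.mem_map_of_mem hp0
    have hdnd : d.keys.Nodup := by rw [hkeys]; exact hnd
    simp only [List.foldl_cons]
    apply ih
    · exact fun q hq => hsub q (by simp [hq])
    · exact (List.nodup_cons.1 hpnd).2
    · rw [PySem.Dict.items_insert_of_contains d _ hcont, hd, List.map_map]
      apply List.map_congr_left
      intro q hq
      simp only [Function.comp]
      by_cases hqk : q.1 = p.1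
      · have hq2 : q.2 = p.2 := items_val_eq d0 hnd (by rw [← hqk]; exact hq) hp0
        have hnr : p.1 ∉ rest.map (·.1) := (List.nodup_cons.1 hpnd).1
        simp [hqk, hq2, hnr]
      · have hb : (q.1 == p.1) = false := by simp [hqk]
        have hcnd : (q.1 ∈ (p :: rest).map (·.1)) ↔ (q.1 ∈ rest.map (·.1)) := by simp [hqk]
        simp only [hb, Bool.false_eq_true, if_neg, not_false_iff]
        rw [if_congr hcnd rfl rfl]

lemma a_outer (d0 : PySem.Dict Int (List Int)) (lowest : PySem.Dict Int Int)
    (hnd : d0.keys.Nodup)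
    (hlow : ∀ o, lowest.get? o = pvMinKeys d0.items o) :
    ∀ (rest : List Int) (d : PySem.Dict Int (List Int)) (seen : PySem.Set Int),
      (∀ r ∈ rest, r ∈ d0.keys) →
      rest.Pairwise (· < ·) →
      (∀ k' ∈ d0.keys, k' ∈ rest ∨ ∀ r ∈ rest, k' < r) →
      (d.items = d0.items.map (fun q => (q.1, if q.1 ∈ rest then q.2 else (pvBval lowest q.1 q.2 ([], PySem.Set.empty)).1))) →
      (∀ o, o ∈ seen ↔ ∃ q ∈ d0.items, q.1 ∉ rest ∧ o ∈ q.2) →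
      (rest.foldl (fun (st : PySem.Dict Int (List Int) × PySem.Set Int) key =>
          let inner := pvAval (PySem.Dict.getD st.1 key []) ([], st.2)
          (PySem.Dict.insert st.1 key inner.1, inner.2)) (d, seen)).1.items
      = d0.items.map (fun q => (q.1, (pvBval lowest q.1 q.2 ([], PySem.Set.empty)).1)) := by
  intro rest
  induction rest with
  | nil =>
    intro d seen _ _ _ hd _
    simpa using hd
  | cons k tail ih =>
    intro d seen hsub hpw hsplit hd hseen
    obtain ⟨q0, hq0, hq0k⟩ := List.mem_map.1 (hsub k (by simp))
    have hkv : (k, q0.2) ∈ d0.items := by rw [← hq0k]; exact hq0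
    set v := q0.2 with hv
    have hklt : ∀ r ∈ tail, k < r := (List.pairwise_cons.1 hpw).1
    have hknt : k ∉ tail := fun h => lt_irrefl k (hklt k h)
    have hkeys : d.keys = d0.keys := keys_of_items_map d d0 _ hd
    have hdnd : d.keys.Nodup := by rw [hkeys]; exact hnd
    have hdk : (k, v) ∈ d.items := by
      rw [hd]
      refine List.mem_map.2 ⟨(k, v), hkv, ?_⟩
      simp
    have hgetD : PySem.Dict.getD d k [] = v := PySem.Dict.getD_of_mem_items d hdk hdnd []
    have hcont : d.contains k = true := by
      rw [PySem.Dict.contains_eq_decide_mem_keys, hkeys, decide_eq_true_iff, ← hq0k]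
      exact List.mem_map_of_mem hq0
    -- the Sp predicate: "o occurs under some already-processed (smaller) key"
    have hmin : ∀ o ∈ v, (PySem.Dict.get? lowest o = some k) ↔
        ¬ (∃ q ∈ d0.items, q.1 ∉ (k :: tail) ∧ o ∈ q.2) := by
      intro o ho
      rw [hlow o]
      have hkL : k ∈ (d0.items.filter (fun p => decide (o ∈ p.2))).map (·.1) :=
        List.mem_map.2 ⟨(k, v), List.mem_filter.2 ⟨hkv, by simpa using ho⟩, rfl⟩
      rw [pvMinKeys, List.min?_eq_some_iff]
      push Not
      constructor
      · rintro ⟨-, hall⟩ q hq hnt ho2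
        rcases hsplit q.1 (List.mem_map_of_mem hq) with h | h
        · exact hnt h
        · have h1 : q.1 < k := h k (by simp)
          have h2 : k ≤ q.1 := hall q.1 (List.mem_map.2 ⟨q, List.mem_filter.2 ⟨hq, by simpa using ho2⟩, rfl⟩)
          omega
      · intro hall
        refine ⟨hkL, ?_⟩
        intro b hb
        obtain ⟨q, hqf, hqb⟩ := List.mem_map.1 hb
        obtain ⟨hq, ho2⟩ := List.mem_filter.1 hqf
        have hmem : q.1 ∈ k :: tail := by
          by_contra hnt
          exact hall q hq hnt (by simpa using ho2)
        subst hqb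
        rcases List.mem_cons.1 hmem with h | h
        · omega
        · have := hklt q.1 h
          omega
    have hinner : (pvAval v ([], seen)).1 = (pvBval lowest k v ([], PySem.Set.empty)).1 := by
      refine inner_eq lowest k v [] seen PySem.Set.empty
        (fun o => ∃ q ∈ d0.items, q.1 ∉ (k :: tail) ∧ o ∈ q.2) ?_ hmin
      intro o
      rw [hseen o]
      simp [PySem.Set.empty]
    simp only [List.foldl_cons, hgetD]
    rw [hinner]
    apply ih
    · exact fun r hr => hsub r (by simp [hr])
    · exact (List.pairwise_cons.1 hpw).2
    · intro k' hk'
      rcases hsplit k' hk' with h | h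
      · rcases List.mem_cons.1 h with h | h
        · subst h; exact Or.inr hklt
        · exact Or.inl h
      · exact Or.inr (fun r hr => h r (by simp [hr]))
    · rw [PySem.Dict.items_insert_of_contains d _ hcont, hd, List.map_map]
      apply List.map_congr_left
      intro q hq
      simp only [Function.comp]
      by_cases hqk : q.1 = k
      · have hq2 : q.2 = v := items_val_eq d0 hnd (by rw [← hqk]; exact hq) hkv
        simp [hqk, hq2, hknt]
      · have hb : (q.1 == k) = false := by simp [hqk]
        have hcnd : (q.1 ∈ (k :: tail)) ↔ (q.1 ∈ tail) := by simp [hqk]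
        simp only [hb, Bool.false_eq_true, if_neg, not_false_iff]
        rw [if_congr hcnd rfl rfl]
    · intro o
      rw [aval_snd_mem v [] seen o, hseen o]
      constructor
      · rintro (⟨q, hq, hnt, ho⟩ | ho)
        · exact ⟨q, hq, fun h => hnt (by simp [h]), ho⟩
        · exact ⟨(k, v), hkv, hknt, ho⟩
      · rintro ⟨q, hq, hnt, ho⟩
        by_cases hqk : q.1 = k
        · have hq2 : q.2 = v := items_val_eq d0 hnd (by rw [← hqk]; exact hq) hkv
          exact Or.inr (by rwa [hq2] at ho)
        · exact Or.inl ⟨q, hq, by simp [hqk, hnt], ho⟩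

lemma pvLow_get? (d0 : PySem.Dict Int (List Int)) (o : Int) :
    (pvLow d0).get? o = pvMinKeys d0.items o := by
  rw [pvLow, low_outer, PySem.Dict.get?_empty]
  rfl

lemma portA_eq (dictionary : List (Int × List Int)) :
    ensure_lowest_key dictionary
    = (PySem.Dict.ofList dictionary).items.map
        (fun q => (q.1, (pvBval (pvLow (PySem.Dict.ofList dictionary)) q.1 q.2 ([], PySem.Set.empty)).1)) := by
  have hnd := PySem.Dict.nodup_keys_ofList (ν := List Int) dictionary
  have hperm := PySem.List.sorted_perm (PySem.Dict.keys (PySem.Dict.ofList dictionary)) (fun k => k) false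
  have hple : (PySem.List.sorted (PySem.Dict.keys (PySem.Dict.ofList dictionary)) (fun k => k) false).Pairwise (· ≤ ·) :=
    PySem.List.sorted_pairwise (PySem.Dict.keys (PySem.Dict.ofList dictionary)) (fun k => k)
  have hnd' : (PySem.List.sorted (PySem.Dict.keys (PySem.Dict.ofList dictionary)) (fun k => k) false).Nodup :=
    hperm.nodup_iff.2 hnd
  have hplt : (PySem.List.sorted (PySem.Dict.keys (PySem.Dict.ofList dictionary)) (fun k => k) false).Pairwise (· < ·) :=
    (hple.and hnd').imp (fun h => lt_of_le_of_ne h.1 h.2)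
  have hd : (PySem.Dict.ofList dictionary).items
      = (PySem.Dict.ofList dictionary).items.map (fun q => (q.1,
          if q.1 ∈ PySem.List.sorted (PySem.Dict.keys (PySem.Dict.ofList dictionary)) (fun k => k) false then q.2
          else (pvBval (pvLow (PySem.Dict.ofList dictionary)) q.1 q.2 ([], PySem.Set.empty)).1)) := by
    conv_lhs => rw [← List.map_id (PySem.Dict.ofList dictionary).items]
    apply List.map_congr_left
    intro q hq
    have hk : q.1 ∈ PySem.Dict.keys (PySem.Dict.ofList dictionary) := List.mem_map_of_mem hq
    simp [hperm.mem_iff.2 hk]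
  show ((PySem.List.sorted (PySem.Dict.keys (PySem.Dict.ofList dictionary)) (fun k => k) false).foldl
      (fun (st : PySem.Dict Int (List Int) × PySem.Set Int) key =>
        let inner := pvAval (PySem.Dict.getD st.1 key []) ([], st.2)
        (PySem.Dict.insert st.1 key inner.1, inner.2))
      (PySem.Dict.ofList dictionary, PySem.Set.empty)).1.items = _
  refine a_outer _ _ hnd (pvLow_get? _) _ _ _ (fun r hr => hperm.mem_iff.1 hr) hplt
    (fun k' hk' => Or.inl (hperm.mem_iff.2 hk')) hd ?_
  intro o
  simp only [PySem.Set.empty, List.not_mem_nil, false_iff, not_exists]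
  rintro q ⟨hq, hnt, ho⟩
  exact hnt (hperm.mem_iff.2 (List.mem_map_of_mem hq))

lemma portB_eq (dictionary : List (Int × List Int)) :
    ensure_lowest_key_alt dictionary
    = (PySem.Dict.ofList dictionary).items.map
        (fun q => (q.1, (pvBval (pvLow (PySem.Dict.ofList dictionary)) q.1 q.2 ([], PySem.Set.empty)).1)) := by
  have hnd := PySem.Dict.nodup_keys_ofList (ν := List Int) dictionary
  have hd : (PySem.Dict.ofList dictionary).items
      = (PySem.Dict.ofList dictionary).items.map (fun q => (q.1,
          if q.1 ∈ (PySem.Dict.ofList dictionary).items.map (·.1) then q.2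
          else (pvBval (pvLow (PySem.Dict.ofList dictionary)) q.1 q.2 ([], PySem.Set.empty)).1)) := by
    conv_lhs => rw [← List.map_id (PySem.Dict.ofList dictionary).items]
    apply List.map_congr_left
    intro q hq
    simp [List.mem_map_of_mem hq]
  show ((PySem.Dict.ofList dictionary).items.foldl
      (fun d p => PySem.Dict.insert d p.1 (pvBval (pvLow (PySem.Dict.ofList dictionary)) p.1 p.2 ([], PySem.Set.empty)).1)
      (PySem.Dict.ofList dictionary)).items = _
  exact b_outer _ _ hnd _ _ (fun q h => h) hnd hd

-- ===== VERDICT (by name: the statement is the Claim_ definition above) =====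
theorem ensure_lowest_key_spec : Claim_equal_ensure_lowest_key := by
  intro dictionary _
  show ensure_lowest_key dictionary = ensure_lowest_key_alt dictionary
  rw [portA_eq, portB_eq]
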